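-- pv_equiv track=rewrite | github.com/IgorBelov10/otus_homeworks | homework1/poker_jokers.py | card_ranks
-- ===== SOURCE A (Python) =====
-- def card_ranks(hand):
--     """Возвращает список рангов (его числовой эквивалент),
--         отсортированный от большего к меньшему"""
--     replacements = {
--         "T": "10",
--         "J": "11",
--         "Q": "12",
--         "K": "13",
--         "A": "14"
--     }
--
--     result = [int(replacements.get(c, c)) for c in list(map(lambda el: el[0], hand))]
--     result.sort(reverse=True)
--     return result
-- ===== SOURCE B (Python) =====
-- RANKS = {"T": 10, "J": 11, "Q": 12, "K": 13, "A": 14}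
--
-- def card_ranks(hand):
--     """Counting sort over the 15 possible ranks instead of a comparison sort."""
--     counts = [0] * 15
--     for card in hand:
--         c = card[0]
--         r = RANKS[c] if c in RANKS else int(c)
--         counts[r] += 1
--     result = []
--     for i in range(14, -1, -1):
--         result.extend([i] * counts[i])
--     return result
-- ===== Notes on version B (the rewrite author's own statement) =====
-- stated objective: alternative
-- what changed: B replaces A's map-then-comparison-sort (sort(reverse=True)) by a single counting pass into a 15-slot counts array and emits the ranks by scanning the counts from 14 down to 0 (a counting sort).
import Mathlib
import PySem

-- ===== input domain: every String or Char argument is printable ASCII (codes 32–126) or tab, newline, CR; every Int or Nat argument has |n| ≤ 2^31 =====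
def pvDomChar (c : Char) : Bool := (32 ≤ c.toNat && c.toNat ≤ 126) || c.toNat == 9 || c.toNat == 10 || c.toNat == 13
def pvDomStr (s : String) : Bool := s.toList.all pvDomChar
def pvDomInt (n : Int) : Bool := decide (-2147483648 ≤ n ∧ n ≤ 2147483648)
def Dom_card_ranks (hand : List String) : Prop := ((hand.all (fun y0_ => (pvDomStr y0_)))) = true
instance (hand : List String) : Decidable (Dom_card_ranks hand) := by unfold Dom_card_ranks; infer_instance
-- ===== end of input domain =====

-- B replaces A's map-then-comparison-sort by a counting sort over the 15 possible
-- ranks; the RETURN values are proved equal on Pre_ (where A returns at all).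

-- ===== PORT A =====
-- replacements = {"T": "10", "J": "11", "Q": "12", "K": "13", "A": "14"}
def pvReplacements : PySem.Dict String String :=
  PySem.Dict.ofList [("T", "10"), ("J", "11"), ("Q", "12"), ("K", "13"), ("A", "14")]

-- int(replacements.get(c, c)) for c = el[0]; none = IndexError / ValueError
def pvARank? (el : String) : Option Int :=
  match el.toList with
  | [] => none
  | c :: _ =>
    PySem.Int.ofStr? (pvReplacements.getD (String.ofList [c]) (String.ofList [c]))

def card_ranks (hand : List String) : List Int :=
  match hand.mapM pvARank? with
  | none => []  -- exception path (IndexError/ValueError), excluded by Pre_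
  | some result => PySem.List.sorted result (fun x => x) true

-- ===== PORT B =====
-- RANKS = {"T": 10, "J": 11, "Q": 12, "K": 13, "A": 14}
def pvRANKS : PySem.Dict String Int :=
  PySem.Dict.ofList [("T", 10), ("J", 11), ("Q", 12), ("K", 13), ("A", 14)]

-- r = RANKS[c] if c in RANKS else int(c), for c = card[0]
def pvBRank? (card : String) : Option Int :=
  match card.toList with
  | [] => none
  | c :: _ =>
    match pvRANKS.get? (String.ofList [c]) with
    | some r => some r
    | none => PySem.Int.ofStr? (String.ofList [c])

-- the counting loop: counts[r] += 1
def pvBCounts? (hand : List String) : Option (List Int) :=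
  hand.foldlM
    (fun counts card =>
      match pvBRank? card with
      | none => none
      | some r => some (PySem.List.pySetD counts r (PySem.List.pyGetD counts r 0 + 1)))
    (List.replicate 15 (0 : Int))

def card_ranks_alt (hand : List String) : List Int :=
  match pvBCounts? hand with
  | none => []  -- exception path, excluded by Pre_
  | some counts =>
    (PySem.List.pyRange 14 (-1) (-1)).foldl
      (fun acc i => acc ++ List.replicate (PySem.List.pyGetD counts i 0).toNat i) []

-- ===== PRECONDITION & SPEC =====
-- card is nonempty and card[0] is a digit or one of T J Q K A
def pvAdmissible (s : String) : Bool :=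
  match s.toList with
  | [] => false
  | c :: _ => (['0','1','2','3','4','5','6','7','8','9','T','J','Q','K','A']).contains c

-- Pre_ admits exactly the hands on which A returns: every card must be nonempty
-- (else card[0] raises IndexError) and start with a digit or T/J/Q/K/A
-- (else int() raises ValueError).
def Pre_card_ranks (hand : List String) : Prop :=
  ∀ s ∈ hand, pvAdmissible s = true

instance (hand : List String) : Decidable (Pre_card_ranks hand) := by
  unfold Pre_card_ranks; infer_instance

def pvWitness_card_ranks : List String := ["AH", "TS", "7D", "7C", "KH"]

def Spec_card_ranks (hand : List String) (out : List Int) : Prop := out = card_ranks_alt hand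
instance (hand : List String) (out : List Int) : Decidable (Spec_card_ranks hand out) := by unfold Spec_card_ranks; infer_instance

-- ===== CLAIM (what is proved, stated in full; the proofs are below) =====
def Claim_equal_card_ranks : Prop := ∀ (hand : List String), Dom_card_ranks hand → Pre_card_ranks hand → Spec_card_ranks hand (card_ranks hand)

-- ===== LEMMAS AND PROOFS =====

-- numeric value of an admissible first character
def pvVal (c : Char) : Int :=
  if c = 'T' then 10 else if c = 'J' then 11 else if c = 'Q' then 12
  else if c = 'K' then 13 else if c = 'A' then 14 else (c.toNat : Int) - 48

theorem pvAdmissible_head (s : String) (h : pvAdmissible s = true) :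
    ∃ c rest, s.toList = c :: rest ∧
      c ∈ ['0','1','2','3','4','5','6','7','8','9','T','J','Q','K','A'] := by
  unfold pvAdmissible at h
  cases hs : s.toList with
  | nil => rw [hs] at h; simp at h
  | cons c rest =>
    rw [hs] at h
    exact ⟨c, rest, rfl, by simpa using h⟩

theorem pvVal_bounds (c : Char)
    (hc : c ∈ ['0','1','2','3','4','5','6','7','8','9','T','J','Q','K','A']) :
    0 ≤ pvVal c ∧ pvVal c < 15 := by
  fin_cases hc <;> decide

theorem pvARank_eq (s : String) (h : pvAdmissible s = true) :
    pvARank? s = some (pvVal ((s.toList).headI)) := by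
  obtain ⟨c, rest, hs, hc⟩ := pvAdmissible_head s h
  unfold pvARank?
  rw [hs]
  simp only [List.headI]
  fin_cases hc <;> decide

theorem pvBRank_eq (s : String) (h : pvAdmissible s = true) :
    pvBRank? s = some (pvVal ((s.toList).headI)) := by
  obtain ⟨c, rest, hs, hc⟩ := pvAdmissible_head s h
  unfold pvBRank?
  rw [hs]
  simp only [List.headI]
  fin_cases hc <;> decide

-- A's mapM succeeds and returns the rank values
theorem pvMapM_eq (hand : List String) (hp : Pre_card_ranks hand) :
    hand.mapM pvARank? = some (hand.map (fun s => pvVal ((s.toList).headI))) := by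
  induction hand with
  | nil => rfl
  | cons s t ih =>
    have hs := hp s (by simp)
    have ht : Pre_card_ranks t := fun x hx => hp x (by simp [hx])
    rw [List.mapM_cons, pvARank_eq s hs, ih ht]
    rfl

-- the counting fold, abstracted over the rank list
def pvFoldCounts (rs : List Int) : List Int :=
  rs.foldl
    (fun counts r => PySem.List.pySetD counts r (PySem.List.pyGetD counts r 0 + 1))
    (List.replicate 15 (0 : Int))

theorem pvBCounts_aux (hand : List String) (hp : Pre_card_ranks hand) :
    ∀ init : List Int,
      hand.foldlM
        (fun counts card =>
          match pvBRank? card with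
          | none => none
          | some r => some (PySem.List.pySetD counts r (PySem.List.pyGetD counts r 0 + 1)))
        init
      = some ((hand.map (fun s => pvVal ((s.toList).headI))).foldl
          (fun counts r => PySem.List.pySetD counts r (PySem.List.pyGetD counts r 0 + 1)) init) := by
  induction hand with
  | nil => intro init; rfl
  | cons s t ih =>
    intro init
    have hs := hp s (by simp)
    have ht : Pre_card_ranks t := fun x hx => hp x (by simp [hx])
    simp only [List.foldlM_cons, pvBRank_eq s hs, List.map_cons, List.foldl_cons]
    exact ih ht _

theorem pvBCounts_eq (hand : List String) (hp : Pre_card_ranks hand) :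
    pvBCounts? hand = some (pvFoldCounts (hand.map (fun s => pvVal ((s.toList).headI)))) := by
  exact pvBCounts_aux hand hp _

-- counts characterization: the i-th entry is rs.count i
theorem pvFoldCounts_spec (rs : List Int) (hb : ∀ r ∈ rs, 0 ≤ r ∧ r < 15) :
    pvFoldCounts rs = (List.range 15).map (fun i : Nat => ((rs.count (i : Int)) : Int)) := by
  induction rs using List.reverseRecOn with
  | nil => decide
  | append_singleton t r ih =>
    have hr := hb r (by simp)
    have hbt : ∀ x ∈ t, 0 ≤ x ∧ x < 15 := fun x hx => hb x (by simp [hx])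
    unfold pvFoldCounts at *
    rw [List.foldl_append, ih hbt]
    simp only [List.foldl_cons, List.foldl_nil]
    rw [PySem.List.pySetD_of_nonneg _ _ hr.1]
    have hpg : PySem.List.pyGetD ((List.range 15).map (fun i : Nat => ((t.count (i : Int)) : Int))) r 0
        = ((t.count r) : Int) := by
      rw [PySem.List.pyGetD_eq_getElem _ _ hr.1 (by simp; omega)]
      simp [Int.toNat_of_nonneg hr.1]
    rw [hpg]
    have hlen : r.toNat < ((List.range 15).map (fun i : Nat => ((t.count (i : Int)) : Int))).length := by
      simp; omega
    apply List.ext_getElem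
    · simp
    · intro j hj hj'
      have hj15 : j < 15 := by simpa using hj'
      rw [List.getElem_set]
      by_cases hjr : r.toNat = j
      · subst hjr
        rw [if_pos rfl]
        simp [Int.toNat_of_nonneg hr.1, List.count_append, List.count_cons]
      · have hne : ¬ ((j : Int) = r) := by omega
        rw [if_neg hjr]
        simp [List.count_append, List.count_cons, Ne.symm hne]

-- Python's reverse sort with identity key is determined by perm + antitone order
theorem pvSortedRevId (xs ys : List Int) (hp : ys.Perm xs)
    (hs : ys.Pairwise (fun a b => b ≤ a)) :
    PySem.List.sorted xs (fun x => x) true = ys := by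
  apply List.Perm.eq_of_pairwise (le := fun a b => b ≤ a)
  · intro a b _ _ h1 h2; omega
  · exact PySem.List.sorted_pairwise_rev xs (fun x => x)
  · exact hs
  · exact (PySem.List.sorted_perm xs (fun x => x) true).trans hp.symm

-- proof-side view of the emission loop: descending blocks of equal ranks
def pvBlocks : Nat → List Int → List Int
  | 0, _ => []
  | n+1, rs => List.replicate (rs.count ((n : Nat) : Int)) ((n : Nat) : Int) ++ pvBlocks n rs

theorem pvBlocks_mem {n : Nat} {rs : List Int} {b : Int} (hb : b ∈ pvBlocks n rs) :
    b < (n : Int) := by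
  induction n with
  | zero => simp [pvBlocks] at hb
  | succ m ih =>
    rw [pvBlocks, List.mem_append] at hb
    rcases hb with hb | hb
    · rcases List.mem_replicate.1 hb with ⟨-, rfl⟩
      push_cast; omega
    · have := ih hb; push_cast; omega

theorem pvBlocks_pairwise (n : Nat) (rs : List Int) :
    (pvBlocks n rs).Pairwise (fun a b => b ≤ a) := by
  induction n with
  | zero => simp [pvBlocks]
  | succ m ih =>
    rw [pvBlocks, List.pairwise_append]
    refine ⟨List.pairwise_replicate.2 (Or.inr le_rfl), ih, ?_⟩
    intro a ha b hb
    rcases List.mem_replicate.1 ha with ⟨-, rfl⟩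
    have := pvBlocks_mem hb
    omega

theorem pvBlocks_perm (n : Nat) (rs : List Int) (h0 : ∀ r ∈ rs, 0 ≤ r) :
    (pvBlocks n rs).Perm (rs.filter (fun r => decide (r < (n : Int)))) := by
  induction n with
  | zero =>
    have he : rs.filter (fun r => decide (r < ((0 : Nat) : Int))) = [] := by
      rw [List.filter_eq_nil_iff]
      intro a ha
      have := h0 a ha
      simp; omega
    rw [he]; rfl
  | succ m ih =>
    rw [pvBlocks]
    have h1 : (rs.filter (fun r => decide (r < ((m+1 : Nat) : Int)))).Perm
        (List.replicate (rs.count ((m : Nat) : Int)) ((m : Nat) : Int)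
          ++ rs.filter (fun r => decide (r < ((m : Nat) : Int)))) := by
      have hsplit := List.filter_append_perm (fun r => r == ((m : Nat) : Int))
        (rs.filter (fun r => decide (r < ((m+1 : Nat) : Int))))
      rw [List.filter_filter, List.filter_filter] at hsplit
      have hl : rs.filter (fun a => (a == ((m : Nat) : Int)) && decide (a < ((m+1 : Nat) : Int)))
          = List.replicate (rs.count ((m : Nat) : Int)) ((m : Nat) : Int) := by
        rw [← List.filter_beq ((m : Nat) : Int)]
        apply List.filter_congr
        intro x _
        by_cases hx : x = ((m : Nat) : Int) <;> simp [hx]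
      have hr : rs.filter (fun a => (!(a == ((m : Nat) : Int))) && decide (a < ((m+1 : Nat) : Int)))
          = rs.filter (fun r => decide (r < ((m : Nat) : Int))) := by
        apply List.filter_congr
        intro x _
        by_cases hx : x = ((m : Nat) : Int)
        · simp [hx]
        · have hbx : (x == ((m : Nat) : Int)) = false := by simpa using hx
          simp only [hbx, Bool.not_false, Bool.true_and]
          simp only [decide_eq_decide]
          push_cast
          omega
      rw [hl, hr] at hsplit
      exact hsplit.symm
    exact (List.Perm.append_left _ ih).trans h1.symm

-- the descending emission loop over the concrete counts equals Python's reverse sort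
set_option maxHeartbeats 1600000 in
theorem pvEmit_eq (rs : List Int) (hb : ∀ r ∈ rs, 0 ≤ r ∧ r < 15) :
    (PySem.List.pyRange 14 (-1) (-1)).foldl
      (fun acc i => acc ++ List.replicate
        (PySem.List.pyGetD ((List.range 15).map (fun j : Nat => ((rs.count (j : Int)) : Int))) i 0).toNat i) []
    = PySem.List.sorted rs (fun x => x) true := by
  have hr : PySem.List.pyRange 14 (-1) (-1)
      = [14,13,12,11,10,9,8,7,6,5,4,3,2,1,0] := by decide
  rw [hr]
  have hget : ∀ i : Int, 0 ≤ i → i < 15 →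
      PySem.List.pyGetD ((List.range 15).map (fun j : Nat => ((rs.count (j : Int)) : Int))) i 0
        = ((rs.count i) : Int) := by
    intro i h0 h1
    rw [PySem.List.pyGetD_eq_getElem _ _ h0 (by simp; omega)]
    simp only [List.getElem_map, List.getElem_range]
    rw [Int.toNat_of_nonneg h0]
  simp only [List.foldl_cons, List.foldl_nil, List.nil_append]
  rw [hget 14 (by norm_num) (by norm_num), hget 13 (by norm_num) (by norm_num),
      hget 12 (by norm_num) (by norm_num), hget 11 (by norm_num) (by norm_num),
      hget 10 (by norm_num) (by norm_num), hget 9 (by norm_num) (by norm_num),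
      hget 8 (by norm_num) (by norm_num), hget 7 (by norm_num) (by norm_num),
      hget 6 (by norm_num) (by norm_num), hget 5 (by norm_num) (by norm_num),
      hget 4 (by norm_num) (by norm_num), hget 3 (by norm_num) (by norm_num),
      hget 2 (by norm_num) (by norm_num), hget 1 (by norm_num) (by norm_num),
      hget 0 (by norm_num) (by norm_num)]
  simp only [Int.toNat_natCast]
  have hchain : (List.replicate (rs.count 14) (14:Int)) ++ List.replicate (rs.count 13) 13 ++
        List.replicate (rs.count 12) 12 ++ List.replicate (rs.count 11) 11 ++
        List.replicate (rs.count 10) 10 ++ List.replicate (rs.count 9) 9 ++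
        List.replicate (rs.count 8) 8 ++ List.replicate (rs.count 7) 7 ++
        List.replicate (rs.count 6) 6 ++ List.replicate (rs.count 5) 5 ++
        List.replicate (rs.count 4) 4 ++ List.replicate (rs.count 3) 3 ++
        List.replicate (rs.count 2) 2 ++ List.replicate (rs.count 1) 1 ++
        List.replicate (rs.count 0) 0
      = pvBlocks 15 rs := by
    show _ = pvBlocks (14+1) rs
    rw [pvBlocks]; rw [show (14:Nat)=13+1 from rfl, pvBlocks]
    rw [show (13:Nat)=12+1 from rfl, pvBlocks, show (12:Nat)=11+1 from rfl, pvBlocks]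
    rw [show (11:Nat)=10+1 from rfl, pvBlocks, show (10:Nat)=9+1 from rfl, pvBlocks]
    rw [show (9:Nat)=8+1 from rfl, pvBlocks, show (8:Nat)=7+1 from rfl, pvBlocks]
    rw [show (7:Nat)=6+1 from rfl, pvBlocks, show (6:Nat)=5+1 from rfl, pvBlocks]
    rw [show (5:Nat)=4+1 from rfl, pvBlocks, show (4:Nat)=3+1 from rfl, pvBlocks]
    rw [show (3:Nat)=2+1 from rfl, pvBlocks, show (2:Nat)=1+1 from rfl, pvBlocks]
    rw [show (1:Nat)=0+1 from rfl, pvBlocks, pvBlocks]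
    push_cast
    simp [List.append_assoc]
  rw [hchain]
  refine (pvSortedRevId rs _ ?_ ?_).symm
  · have hself : rs.filter (fun r => decide (r < ((15 : Nat) : Int))) = rs := by
      rw [List.filter_eq_self]
      intro a ha
      have := hb a ha
      simp; omega
    have := pvBlocks_perm 15 rs (fun r hr => (hb r hr).1)
    rwa [hself] at this
  · exact pvBlocks_pairwise 15 rs


-- ===== VERDICT (by name: the statement is the Claim_ definition above) =====
theorem card_ranks_spec : Claim_equal_card_ranks := by
  intro hand _ hp
  unfold Spec_card_ranks card_ranks card_ranks_alt
  rw [pvMapM_eq hand hp, pvBCounts_eq hand hp]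
  have hb : ∀ r ∈ hand.map (fun s => pvVal ((s.toList).headI)), 0 ≤ r ∧ r < 15 := by
    intro r hr
    rcases List.mem_map.1 hr with ⟨s, hs, rfl⟩
    obtain ⟨c, rest, hsl, hc⟩ := pvAdmissible_head s (hp s hs)
    rw [hsl]
    simpa [List.headI] using pvVal_bounds c hc
  rw [pvFoldCounts_spec _ hb]
  exact (pvEmit_eq _ hb).symm
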